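-- pv_equiv track=rewrite | github.com/efg-uuy/_multi_rag | image_analysis_utils.py | _infer_chart_type
-- ===== SOURCE A (Python) =====
-- from typing import Dict, Any, Optional, List, Tuple
--
-- def _infer_chart_type(chart_boxes: List[Dict[str, Any]]) -> str:
--     """从视觉特征推断图表类型（简化实现）"""
--     # 实际应用中可结合预训练分类模型
--     if not chart_boxes:
--         return "未知"
--
--     # 简单规则：根据检测到的类别推断
--     class_names = [box["class"].lower() for box in chart_boxes]
--     if "bar" in class_names:
--         return "柱状图"
--     elif "line" in class_names:
--         return "折线图"
--     elif "pie" in class_names: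
--         return "饼图"
--     elif "table" in class_names:
--         return "表格"
--     return "其他"
-- ===== SOURCE B (Python) =====
-- _PRIO = {"bar": 0, "line": 1, "pie": 2, "table": 3}
-- _NAMES = ("柱状图", "折线图", "饼图", "表格", "其他")
--
-- def _infer_chart_type(chart_boxes):
--     """从视觉特征推断图表类型：单遍 argmin 扫描"""
--     if not chart_boxes:
--         return "未知"
--     best = 4
--     for box in chart_boxes:
--         name = box["class"].lower()
--         best = min(best, _PRIO.get(name, 4))
--     return _NAMES[best]
-- ===== Notes on version B (the rewrite author's own statement) =====
-- stated objective: idiomatic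
-- what changed: Replaces the build-a-list-then-scan-it-four-times membership chain with a single argmin pass that keeps the minimum priority index seen and decodes it at the end.
import Mathlib
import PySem

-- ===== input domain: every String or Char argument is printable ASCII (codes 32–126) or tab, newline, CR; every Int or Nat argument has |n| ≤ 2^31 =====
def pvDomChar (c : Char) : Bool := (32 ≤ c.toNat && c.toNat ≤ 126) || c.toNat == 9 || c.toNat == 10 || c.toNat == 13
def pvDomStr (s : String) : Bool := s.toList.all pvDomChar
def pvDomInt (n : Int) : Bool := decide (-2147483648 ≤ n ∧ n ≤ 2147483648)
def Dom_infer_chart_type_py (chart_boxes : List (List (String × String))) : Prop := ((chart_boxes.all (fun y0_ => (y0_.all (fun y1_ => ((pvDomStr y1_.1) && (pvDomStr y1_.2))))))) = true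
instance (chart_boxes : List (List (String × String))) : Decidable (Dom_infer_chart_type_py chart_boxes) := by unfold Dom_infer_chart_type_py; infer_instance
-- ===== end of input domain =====

-- B replaces A's build-a-name-list-then-four-membership-scans with a single argmin pass (same cost, one traversal).

-- box["class"]: first-match dict lookup (Pre_ guarantees the key is present, so getD's default is never used)
def pvClassOf (box : List (String × String)) : String :=
  ((PySem.Dict.mk box).get? "class").getD ""

-- ===== PORT A =====
def infer_chart_type_py (chart_boxes : List (List (String × String))) : String :=
  if chart_boxes = [] then "未知"
  else
    let class_names := chart_boxes.map (fun box => PySem.Str.lower (pvClassOf box))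
    if class_names.contains "bar" then "柱状图"
    else if class_names.contains "line" then "折线图"
    else if class_names.contains "pie" then "饼图"
    else if class_names.contains "table" then "表格"
    else "其他"

-- ===== PORT B =====
-- _PRIO.get(name, 4)
def pvPrio (name : String) : Nat :=
  if name = "bar" then 0 else if name = "line" then 1
  else if name = "pie" then 2 else if name = "table" then 3 else 4

-- _NAMES[best]
def pvDecode (best : Nat) : String :=
  match best with
  | 0 => "柱状图" | 1 => "折线图" | 2 => "饼图" | 3 => "表格" | _ => "其他"

def infer_chart_type_py_alt (chart_boxes : List (List (String × String))) : String :=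
  if chart_boxes = [] then "未知"
  else
    pvDecode (chart_boxes.foldl
      (fun best box => min best (pvPrio (PySem.Str.lower (pvClassOf box)))) 4)

-- ===== PRECONDITION & SPEC =====
-- Pre_ excludes exactly the boxes without a "class" key, where Python A raises KeyError.
def Pre_infer_chart_type_py (chart_boxes : List (List (String × String))) : Prop :=
  (chart_boxes.all (fun box => box.any (fun kv => kv.1 == "class"))) = true
instance (chart_boxes : List (List (String × String))) : Decidable (Pre_infer_chart_type_py chart_boxes) := by unfold Pre_infer_chart_type_py; infer_instance
def pvWitness_infer_chart_type_py : (List (List (String × String))) := [[("class", "Bar")]]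

def Spec_infer_chart_type_py (chart_boxes : List (List (String × String))) (out : String) : Prop := out = infer_chart_type_py_alt chart_boxes
instance (chart_boxes : List (List (String × String))) (out : String) : Decidable (Spec_infer_chart_type_py chart_boxes out) := by unfold Spec_infer_chart_type_py; infer_instance

-- ===== CLAIM (what is proved, stated in full; the proofs are below) =====
def Claim_equal_infer_chart_type_py : Prop := ∀ (chart_boxes : List (List (String × String))), Dom_infer_chart_type_py chart_boxes → Pre_infer_chart_type_py chart_boxes → Spec_infer_chart_type_py chart_boxes (infer_chart_type_py chart_boxes)

-- ===== LEMMAS AND PROOFS =====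

-- the minimum priority of a list of names, as A's membership chain computes it
def pvM (ns : List String) : Nat :=
  if ns.contains "bar" then 0 else if ns.contains "line" then 1
  else if ns.contains "pie" then 2 else if ns.contains "table" then 3 else 4

theorem pvM_cons (n : String) (ns : List String) :
    pvM (n :: ns) = min (pvPrio n) (pvM ns) := by
  simp only [pvM, pvPrio, List.contains_cons, Bool.or_eq_true, beq_iff_eq]
  split_ifs <;> simp_all <;> omega

theorem pv_fold_spec (bs : List (List (String × String))) (a : Nat) (ha : a ≤ 4) :
    bs.foldl (fun b box => min b (pvPrio (PySem.Str.lower (pvClassOf box)))) a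
      = min a (pvM (bs.map (fun box => PySem.Str.lower (pvClassOf box)))) := by
  induction bs generalizing a with
  | nil => simp [pvM]; omega
  | cons box bs ih =>
    have hp : pvPrio (PySem.Str.lower (pvClassOf box)) ≤ 4 := by
      unfold pvPrio; split_ifs <;> omega
    rw [List.foldl_cons, ih _ (by omega), List.map_cons, pvM_cons, Nat.min_assoc]

theorem pvM_le (ns : List String) : pvM ns ≤ 4 := by
  unfold pvM; split_ifs <;> omega

-- ===== VERDICT (by name: the statement is the Claim_ definition above) =====
theorem infer_chart_type_py_spec : Claim_equal_infer_chart_type_py := by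
  intro chart_boxes _ _
  unfold Spec_infer_chart_type_py infer_chart_type_py infer_chart_type_py_alt
  by_cases h : chart_boxes = []
  · simp [h]
  · simp only [h, if_false]
    rw [pv_fold_spec _ _ (by omega), Nat.min_eq_right (pvM_le _)]
    set ns := chart_boxes.map (fun box => PySem.Str.lower (pvClassOf box))
    unfold pvM pvDecode
    split_ifs <;> rfl
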